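-- pv_equiv track=rewrite | github.com/violet-luo/leetcode | 9_math/Google OA. Max Even Num Sum.py | max_even_num_sum
-- ===== SOURCE A (Python) =====
-- def max_even_num_sum(N):
--     if N % 2 == 1:
--         return []
--
--     total = 0
--     k = 1
--
--     while total < N:
--         total = k * (k + 1)
--         k += 1
--
--     diff = total - N
--
--     res = []
--     for i in range(1,k):
--         res.append(2*i)
--     if diff in res:
--         res.remove(diff)
--     return res
-- ===== SOURCE B (Python) =====
-- import math
--
-- def max_even_num_sum(N):
--     if N % 2 == 1 or N <= 0:
--         return []
--     s = math.isqrt(N)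
--     m = s if s * (s + 1) >= N else s + 1
--     diff = m * (m + 1) - N
--     res = list(range(2, 2 * m + 1, 2))
--     if diff in res:
--         res.remove(diff)
--     return res
-- ===== Notes on version B (the rewrite author's own statement) =====
-- stated objective: alternative
-- what changed: The incremental while-loop search for the smallest k whose triangular-style product reaches N is replaced by a closed-form computation using math.isqrt with a one-step adjustment, and the even list is produced directly by a stepped range instead of an append loop.
import Mathlib
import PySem

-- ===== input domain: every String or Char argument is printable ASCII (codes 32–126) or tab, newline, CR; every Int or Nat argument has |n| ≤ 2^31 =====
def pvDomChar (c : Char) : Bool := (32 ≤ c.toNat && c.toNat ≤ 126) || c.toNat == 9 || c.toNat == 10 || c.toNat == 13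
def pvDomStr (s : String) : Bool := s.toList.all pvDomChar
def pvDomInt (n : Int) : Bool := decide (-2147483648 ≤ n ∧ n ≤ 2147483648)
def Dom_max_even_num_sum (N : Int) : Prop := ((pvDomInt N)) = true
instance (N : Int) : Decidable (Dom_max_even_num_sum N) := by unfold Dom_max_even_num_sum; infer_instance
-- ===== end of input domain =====

-- B replaces A's incremental while-loop search for the smallest k with k*(k+1) >= N by a
-- closed-form integer-square-root computation; same exact output (objective: alternative).

-- ===== PORT A =====
-- the 'while total < N' loop; fuel only makes the same computation total (N.toNat + 2 always suffices)
def pvGoA (N : Int) : Nat → Int → Int → Int × Int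
  | 0, total, k => (total, k)
  | f+1, total, k => if total < N then pvGoA N f (k*(k+1)) (k+1) else (total, k)

def max_even_num_sum (N : Int) : List Int :=
  if PySem.Int.mod N 2 = 1 then []
  else
    let p := pvGoA N (N.toNat + 2) 0 1
    let diff := p.1 - N
    let res := (PySem.List.pyRange 1 p.2 1).foldl (fun acc i => acc ++ [2*i]) []
    if res.contains diff then (PySem.List.remove? res diff).getD res else res

-- ===== PORT B =====
def max_even_num_sum_alt (N : Int) : List Int :=
  if PySem.Int.mod N 2 = 1 ∨ N ≤ 0 then []
  else
    let s : Int := (Nat.sqrt N.toNat : Int)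
    let m := if s * (s + 1) ≥ N then s else s + 1
    let diff := m * (m + 1) - N
    let res := PySem.List.pyRange 2 (2*m + 1) 2
    if res.contains diff then (PySem.List.remove? res diff).getD res else res

-- ===== PRECONDITION & SPEC =====
def Spec_max_even_num_sum (N : Int) (out : List Int) : Prop := out = max_even_num_sum_alt N
instance (N : Int) (out : List Int) : Decidable (Spec_max_even_num_sum N out) := by unfold Spec_max_even_num_sum; infer_instance

-- ===== CLAIM (what is proved, stated in full; the proofs are below) =====
def Claim_equal_max_even_num_sum : Prop := ∀ (N : Int), Dom_max_even_num_sum N → Spec_max_even_num_sum N (max_even_num_sum N)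

-- ===== LEMMAS AND PROOFS =====

-- once the guard fails, any fuel returns the state unchanged
theorem pvGoA_exit (N : Int) (f : Nat) (total k : Int) (h : ¬ total < N) :
    pvGoA N f total k = (total, k) := by
  cases f <;> simp [pvGoA, h]

-- loop invariant: starting at ((k-1)*k, k) with 1 ≤ k ≤ m, the loop ends at (m*(m+1), m+1)
theorem pvGoA_run (N m : Int) (hm1 : 1 ≤ m) (hmN : N ≤ m * (m + 1)) (hmlt : (m - 1) * m < N) :
    ∀ (f : Nat) (k : Int), 1 ≤ k → k ≤ m → (m + 1 - k).toNat ≤ f →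
      pvGoA N f ((k - 1) * k) k = (m * (m + 1), m + 1) := by
  intro f
  induction f with
  | zero => intro k hk1 hkm hf; omega
  | succ f ih =>
    intro k hk1 hkm hf
    have hguard : (k - 1) * k < N := by nlinarith
    rw [pvGoA, if_pos hguard]
    rcases eq_or_lt_of_le hkm with h | h
    · subst h
      rw [pvGoA_exit]
      omega
    · have : k * (k + 1) = ((k + 1) - 1) * (k + 1) := by ring
      rw [this]
      exact ih (k + 1) (by omega) (by omega) (by omega)

-- characterisation of B's closed-form m for N > 0
theorem m_char (N : Int) (hN : 0 < N) :
    ∀ s m : Int, s = (Nat.sqrt N.toNat : Int) → m = (if s * (s + 1) ≥ N then s else s + 1) →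
      1 ≤ m ∧ N ≤ m * (m + 1) ∧ (m - 1) * m < N := by
  intro s m hs hm
  subst hm; subst hs
  have hNt : (N.toNat : Int) = N := Int.toNat_of_nonneg hN.le
  have hlow : ((Nat.sqrt N.toNat : Int)) * (Nat.sqrt N.toNat : Int) ≤ N := by
    have h1 := Nat.sqrt_le' N.toNat
    have h1' := Int.ofNat_le.mpr h1
    push_cast at h1'
    nlinarith [h1', hNt.ge, hNt.le]
  have hhigh : N < ((Nat.sqrt N.toNat : Int)) * (Nat.sqrt N.toNat : Int) + 2 * (Nat.sqrt N.toNat : Int) + 1 := by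
    have h2 := Nat.lt_succ_sqrt' N.toNat
    have h2' := Int.ofNat_lt.mpr h2
    push_cast at h2'
    nlinarith [h2', hNt.ge, hNt.le]
  have hs1 : 1 ≤ (Nat.sqrt N.toNat : Int) := by
    have h3 : 0 < Nat.sqrt N.toNat := Nat.sqrt_pos.mpr (by omega)
    exact_mod_cast h3
  by_cases hcase : (Nat.sqrt N.toNat : Int) * ((Nat.sqrt N.toNat : Int) + 1) ≥ N
  · rw [if_pos hcase]
    exact ⟨hs1, hcase, by nlinarith⟩
  · rw [if_neg hcase]
    exact ⟨by omega, by nlinarith, by nlinarith⟩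

-- the two list-building strategies produce the same list
theorem res_eq (m : Int) (hm : 1 ≤ m) :
    (PySem.List.pyRange 1 (m + 1) 1).foldl (fun acc i => acc ++ [2*i]) [] =
    PySem.List.pyRange 2 (2*m + 1) 2 := by
  rw [PySem.List.foldl_append_singleton_eq_map, List.nil_append]
  rw [PySem.List.pyRange_one, PySem.List.pyRange_of_pos 2 (2*m + 1) (by norm_num)]
  rw [if_pos (by omega)]
  have harg : ((2*m + 1 - 2 + 2 - 1) / 2).toNat = (m + 1 - 1).toNat := by
    have : (2*m + 1 - 2 + 2 - 1) / 2 = m := by omega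
    omega
  rw [harg, List.map_map]
  apply List.map_congr_left
  intro k _
  simp only [Function.comp_apply]
  ring

-- ===== VERDICT (by name: the statement is the Claim_ definition above) =====
theorem max_even_num_sum_spec : Claim_equal_max_even_num_sum := by
  intro N _
  unfold Spec_max_even_num_sum max_even_num_sum max_even_num_sum_alt
  by_cases hodd : PySem.Int.mod N 2 = 1
  · rw [if_pos hodd, if_pos (Or.inl hodd)]
  · by_cases hle : N ≤ 0
    · rw [if_neg hodd, if_pos (Or.inr hle)]
      rw [pvGoA_exit N _ 0 1 (by omega)]
      simp [PySem.List.pyRange_one_eq_nil (by omega : (1:Int) ≤ 1)]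
    · have hN : 0 < N := by omega
      rw [if_neg hodd, if_neg (not_or.mpr ⟨hodd, hle⟩)]
      set s : Int := (Nat.sqrt N.toNat : Int) with hs
      set m : Int := if s * (s + 1) ≥ N then s else s + 1 with hm
      obtain ⟨hm1, hmN, hmlt⟩ := m_char N hN s m hs hm
      have hmle : m ≤ N := by nlinarith
      have hrun : pvGoA N (N.toNat + 2) 0 1 = (m * (m + 1), m + 1) := by
        have h0 : (0 : Int) = (1 - 1) * 1 := by ring
        rw [h0]
        exact pvGoA_run N m hm1 hmN hmlt (N.toNat + 2) 1 le_rfl hm1 (by omega)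
      rw [hrun]
      simp only
      rw [res_eq m hm1]
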